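-- pv_equiv track=rewrite | github.com/allbilly/libane | dump.py | format_sbs_compact
-- ===== SOURCE A (Python) =====
-- from collections import OrderedDict
-- from typing import List, Optional, Tuple
--
-- def format_sbs_compact(
--     words: List[int],
--     fields: List[Tuple[str, int, int, int, int]],
-- ) -> List[str]:
--     grouped: "OrderedDict[int, List[Tuple[str, int, int, int, int]]]" = OrderedDict()
--     for name, val, by, bi, sz in fields:
--         word_offset = (by // 8) * 8
--         grouped.setdefault(word_offset, []).append((name, val, by, bi, sz))
--     lines: List[str] = []
--     for word_offset in sorted(grouped.keys()):
--         word_index = word_offset // 8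
--         word = words[word_index] if 0 <= word_index < len(words) else 0
--         items = sorted(grouped[word_offset], key=lambda x: (x[2], x[3]))
--         parts = [
--             f"{name}={val} (b0x{by:x} bit{bi} w{sz})"
--             for name, val, by, bi, sz in items
--         ]
--         lines.append(f"[0x{word_offset:03x}] {word:016x} | " + "; ".join(parts))
--     return lines
-- ===== SOURCE B (Python) =====
-- from typing import List, Tuple
--
--
-- def _emit(words: List[int], run: List[Tuple[str, int, int, int, int]]) -> str:
--     word_offset = (run[0][2] // 8) * 8
--     word_index = word_offset // 8
--     word = words[word_index] if 0 <= word_index < len(words) else 0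
--     parts = [f"{name}={val} (b0x{by:x} bit{bi} w{sz})" for name, val, by, bi, sz in run]
--     return f"[0x{word_offset:03x}] {word:016x} | " + "; ".join(parts)
--
--
-- def format_sbs_compact(
--     words: List[int],
--     fields: List[Tuple[str, int, int, int, int]],
-- ) -> List[str]:
--     # One global stable sort by (byte, bit); word groups come out contiguous and
--     # in order because the word offset is monotone in the byte offset.
--     ordered = sorted(fields, key=lambda f: (f[2], f[3]))
--     lines: List[str] = []
--     run: List[Tuple[str, int, int, int, int]] = []
--     for f in ordered:
--         if run and (f[2] // 8) * 8 != (run[0][2] // 8) * 8: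
--             lines.append(_emit(words, run))
--             run = []
--         run.append(f)
--     if run:
--         lines.append(_emit(words, run))
--     return lines
-- ===== Notes on version B (the rewrite author's own statement) =====
-- stated objective: alternative
-- what changed: Replaces the OrderedDict bucketing plus per-key sorting with one global stable sort by (byte, bit) followed by a single linear scan that emits a line whenever the word offset of the current run changes.
import Mathlib
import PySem

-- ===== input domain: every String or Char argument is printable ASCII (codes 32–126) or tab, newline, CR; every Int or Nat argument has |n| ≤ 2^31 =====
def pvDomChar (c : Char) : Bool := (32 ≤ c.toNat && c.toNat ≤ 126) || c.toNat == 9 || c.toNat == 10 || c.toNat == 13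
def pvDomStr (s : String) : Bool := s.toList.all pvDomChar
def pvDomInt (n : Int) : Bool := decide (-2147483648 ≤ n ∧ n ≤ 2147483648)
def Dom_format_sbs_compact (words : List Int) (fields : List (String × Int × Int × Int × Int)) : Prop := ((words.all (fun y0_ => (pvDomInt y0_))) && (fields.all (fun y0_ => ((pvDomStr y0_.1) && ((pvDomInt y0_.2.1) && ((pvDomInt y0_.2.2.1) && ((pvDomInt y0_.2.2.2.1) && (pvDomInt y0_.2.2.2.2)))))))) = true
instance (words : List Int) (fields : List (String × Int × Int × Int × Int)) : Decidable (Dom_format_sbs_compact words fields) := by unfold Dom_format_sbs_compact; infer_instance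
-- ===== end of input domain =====

-- B replaces A's OrderedDict bucketing + per-key sorting by ONE global stable sort by
-- (byte, bit) followed by a single linear scan emitting a line per contiguous word-offset
-- run (objective: alternative decomposition, same asymptotic cost).

-- shared formatting helpers (both Pythons build the identical f-strings)
-- f"{n:0wx}": lowercase hex of |n|, '-' first for negatives, zero-padded to total width w.
-- Exact for every Int (Nat.toDigits 16 produces Python's lowercase hex digits).
def pyHexPad (w : Nat) (n : Int) : String :=
  let ds : List Char := Nat.toDigits 16 n.natAbs
  if n < 0 then
    "-" ++ String.ofList (List.replicate (w - 1 - ds.length) '0') ++ String.ofList ds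
  else
    String.ofList (List.replicate (w - ds.length) '0') ++ String.ofList ds

-- f"{name}={val} (b0x{by:x} bit{bi} w{sz})"
def mkPart (f : String × Int × Int × Int × Int) : String :=
  f.1 ++ "=" ++ PySem.Int.toStr f.2.1 ++ " (b0x" ++ pyHexPad 0 f.2.2.1 ++ " bit" ++
    PySem.Int.toStr f.2.2.2.1 ++ " w" ++ PySem.Int.toStr f.2.2.2.2 ++ ")"

-- f"[0x{word_offset:03x}] {word:016x} | " + "; ".join(parts), with the guarded word lookup
def mkLine (words : List Int) (word_offset : Int) (items : List (String × Int × Int × Int × Int)) : String :=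
  let word_index := PySem.Int.floordiv word_offset 8
  let word : Int := if 0 ≤ word_index ∧ word_index < words.length then PySem.List.pyGetD words word_index 0 else 0
  "[0x" ++ pyHexPad 3 word_offset ++ "] " ++ pyHexPad 16 word ++ " | " ++
    String.intercalate "; " (items.map mkPart)

-- ===== PORT A =====
def format_sbs_compact (words : List Int) (fields : List (String × Int × Int × Int × Int)) : List String :=
  -- grouped.setdefault(word_offset, []).append(f)  ==  d[k] = d.get(k, []) + [f]
  let grouped : PySem.Dict Int (List (String × Int × Int × Int × Int)) :=
    fields.foldl (fun d f => d.modify (PySem.Int.floordiv f.2.2.1 8 * 8) [] (fun l => l ++ [f])) PySem.Dict.empty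
  let sortedKeys := PySem.List.sorted grouped.keys (fun x => x) false
  sortedKeys.foldl (fun lines word_offset =>
    let items := PySem.List.sorted2 (grouped.getD word_offset []) (fun x => x.2.2.1) (fun x => x.2.2.2.1) false
    lines ++ [mkLine words word_offset items]) []

-- ===== PORT B =====
-- the body of B's for-loop (flush the run when the word offset changes, then append f)
def pvAltStep (words : List Int) (st : List String × List (String × Int × Int × Int × Int))
    (f : String × Int × Int × Int × Int) : List String × List (String × Int × Int × Int × Int) :=
  match st with
  | (lines, []) => (lines, [f])
  | (lines, g :: run) =>
    if PySem.Int.floordiv f.2.2.1 8 * 8 ≠ PySem.Int.floordiv g.2.2.1 8 * 8 then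
      (lines ++ [mkLine words (PySem.Int.floordiv g.2.2.1 8 * 8) (g :: run)], [f])
    else (lines, (g :: run) ++ [f])

-- the trailing 'if run: lines.append(...)'
def pvAltFlush (words : List Int) (st : List String × List (String × Int × Int × Int × Int)) : List String :=
  match st with
  | (lines, []) => lines
  | (lines, g :: run) => lines ++ [mkLine words (PySem.Int.floordiv g.2.2.1 8 * 8) (g :: run)]

def format_sbs_compact_alt (words : List Int) (fields : List (String × Int × Int × Int × Int)) : List String :=
  let ordered := PySem.List.sorted2 fields (fun f => f.2.2.1) (fun f => f.2.2.2.1) false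
  pvAltFlush words (ordered.foldl (pvAltStep words) ([], []))

-- ===== PRECONDITION & SPEC =====
def Spec_format_sbs_compact (words : List Int) (fields : List (String × Int × Int × Int × Int)) (out : List String) : Prop := out = format_sbs_compact_alt words fields
instance (words : List Int) (fields : List (String × Int × Int × Int × Int)) (out : List String) : Decidable (Spec_format_sbs_compact words fields out) := by unfold Spec_format_sbs_compact; infer_instance

-- ===== CLAIM (what is proved, stated in full; the proofs are below) =====
def Claim_equal_format_sbs_compact : Prop := ∀ (words : List Int) (fields : List (String × Int × Int × Int × Int)), Dom_format_sbs_compact words fields → Spec_format_sbs_compact words fields (format_sbs_compact words fields)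

-- ===== LEMMAS AND PROOFS =====

-- abbreviations used only by the proofs
abbrev Fld : Type := String × Int × Int × Int × Int
def fOff (f : Fld) : Int := PySem.Int.floordiv f.2.2.1 8 * 8
def bLT (a b : Fld) : Bool :=
  decide (a.2.2.1 < b.2.2.1) || (!decide (b.2.2.1 < a.2.2.1) && decide (a.2.2.2.1 < b.2.2.2.1))

lemma bLT_iff (a b : Fld) : bLT a b = true ↔
    (a.2.2.1 < b.2.2.1 ∨ (¬ b.2.2.1 < a.2.2.1 ∧ a.2.2.2.1 < b.2.2.2.1)) := by
  simp [bLT]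

lemma bLT_asymm {x y : Fld} (h : bLT x y = true) : bLT y x = false := by
  rw [Bool.eq_false_iff, Ne, bLT_iff]
  rw [bLT_iff] at h
  omega

lemma bLT_of_bLT_of_not {x y z : Fld} (h1 : bLT x y = true) (h2 : bLT z y = false) : bLT x z = true := by
  rw [Bool.eq_false_iff, Ne, bLT_iff] at h2
  rw [bLT_iff] at h1 ⊢
  omega

lemma bLT_trans {z x y : Fld} (h1 : bLT z x = true) (h2 : bLT x y = true) : bLT z y = true := by
  rw [bLT_iff] at h1 h2 ⊢
  omega

lemma kby_le_of_bLT_false {a b : Fld} (h : bLT b a = false) : a.2.2.1 ≤ b.2.2.1 := by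
  rw [Bool.eq_false_iff, Ne, bLT_iff] at h
  omega

lemma fOff_mono {a b : Int} (h : a ≤ b) : PySem.Int.floordiv a 8 * 8 ≤ PySem.Int.floordiv b 8 * 8 := by
  rw [PySem.Int.floordiv_eq_ediv_of_pos (by norm_num), PySem.Int.floordiv_eq_ediv_of_pos (by norm_num)]
  have := Int.ediv_le_ediv (a := a) (b := b) (c := 8) (by norm_num) h
  omega

-- the stable insertion sort both sorted2 calls unfold to
def insSort (xs : List Fld) : List Fld :=
  xs.foldl (fun acc x => PySem.List.insertBy bLT x acc) []

lemma sorted2_eq_insSort (xs : List Fld) :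
    PySem.List.sorted2 xs (fun f => f.2.2.1) (fun f => f.2.2.2.1) false = insSort xs := rfl

def SortedInv (l : List Fld) : Prop := l.Pairwise (fun a b => bLT b a = false)

lemma insertBy_sortedInv {x : Fld} {acc : List Fld} (h : SortedInv acc) :
    SortedInv (PySem.List.insertBy bLT x acc) := by
  induction acc with
  | nil => simp [PySem.List.insertBy, SortedInv]
  | cons y ys ih =>
    rcases (List.pairwise_cons.mp h) with ⟨hy, hys⟩
    by_cases hxy : bLT x y = true
    · rw [show PySem.List.insertBy bLT x (y :: ys) = x :: y :: ys by simp [PySem.List.insertBy, hxy]]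
      refine List.pairwise_cons.mpr ⟨?_, h⟩
      intro z hz
      rcases List.mem_cons.mp hz with rfl | hz'
      · exact bLT_asymm hxy
      · rcases Bool.eq_false_or_eq_true (bLT z x) with h0 | h0
        · exact absurd (hy z hz') (by simp [bLT_trans h0 hxy])
        · exact h0
    · rw [show PySem.List.insertBy bLT x (y :: ys) = y :: PySem.List.insertBy bLT x ys by
        simp [PySem.List.insertBy, hxy]]
      refine List.pairwise_cons.mpr ⟨?_, ih hys⟩
      intro z hz
      rcases (PySem.List.mem_insertBy (before := bLT) (x := x) (ys := ys) (y := z)).mp hz with rfl | hz'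
      · simpa using hxy
      · exact hy z hz'

lemma foldl_insertBy_sortedInv (xs : List Fld) {acc : List Fld} (h : SortedInv acc) :
    SortedInv (xs.foldl (fun acc x => PySem.List.insertBy bLT x acc) acc) := by
  induction xs generalizing acc with
  | nil => exact h
  | cons x xs ih => exact ih (insertBy_sortedInv h)

lemma insSort_sortedInv (xs : List Fld) : SortedInv (insSort xs) :=
  foldl_insertBy_sortedInv xs (by simp [SortedInv])

-- filter commutes with a stable insertion (for ANY Bool predicate)
lemma filter_insertBy (p : Fld → Bool) (x : Fld) {acc : List Fld} (h : SortedInv acc) :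
    (PySem.List.insertBy bLT x acc).filter p =
      if p x then PySem.List.insertBy bLT x (acc.filter p) else acc.filter p := by
  induction acc with
  | nil => by_cases hx : p x <;> simp [PySem.List.insertBy, hx]
  | cons y ys ih =>
    rcases (List.pairwise_cons.mp h) with ⟨hy, hys⟩
    by_cases hxy : bLT x y = true
    · rw [show PySem.List.insertBy bLT x (y :: ys) = x :: y :: ys by simp [PySem.List.insertBy, hxy]]
      by_cases hx : p x
      · -- insertBy x (filter p (y :: ys)) must put x first
        have hins : PySem.List.insertBy bLT x ((y :: ys).filter p) = x :: (y :: ys).filter p := by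
          cases hfy : (y :: ys).filter p with
          | nil => simp [PySem.List.insertBy, hfy]
          | cons z zs =>
            have hz : z ∈ y :: ys := List.mem_of_mem_filter (hfy ▸ List.mem_cons_self)
            have hxz : bLT x z = true := by
              rcases List.mem_cons.mp hz with rfl | hz'
              · exact hxy
              · exact bLT_of_bLT_of_not hxy (hy z hz')
            simp [PySem.List.insertBy, hfy, hxz]
        simp [hx, hins]
      · simp [hx, List.filter_cons, if_neg]
    · rw [show PySem.List.insertBy bLT x (y :: ys) = y :: PySem.List.insertBy bLT x ys by
        simp [PySem.List.insertBy, hxy]]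
      by_cases hpy : p y
      · by_cases hx : p x
        · have : PySem.List.insertBy bLT x (y :: ys.filter p) =
              y :: PySem.List.insertBy bLT x (ys.filter p) := by
            simp [PySem.List.insertBy, hxy]
          simp [List.filter_cons, hpy, hx, ih hys, this]
        · simp [List.filter_cons, hpy, hx, ih hys]
      · by_cases hx : p x <;> simp [List.filter_cons, hpy, hx, ih hys]

lemma filter_foldl_insertBy (p : Fld → Bool) (xs : List Fld) {acc : List Fld} (h : SortedInv acc) :
    (xs.foldl (fun acc x => PySem.List.insertBy bLT x acc) acc).filter p =
      (xs.filter p).foldl (fun acc x => PySem.List.insertBy bLT x acc) (acc.filter p) := by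
  induction xs generalizing acc with
  | nil => rfl
  | cons x xs ih =>
    by_cases hx : p x
    · simp only [List.foldl_cons, List.filter_cons, hx, if_pos]
      rw [ih (insertBy_sortedInv h), filter_insertBy p x h, if_pos hx]
    · simp only [List.foldl_cons, List.filter_cons, hx]
      rw [ih (insertBy_sortedInv h), filter_insertBy p x h, if_neg (by simp [hx])]
      simp

lemma filter_insSort (p : Fld → Bool) (xs : List Fld) :
    (insSort xs).filter p = insSort (xs.filter p) := by
  have := filter_foldl_insertBy p xs (acc := []) (by simp [SortedInv])
  simpa [insSort] using this

-- the offsets of the sorted list are nondecreasing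
lemma insSort_fOff_pairwise (xs : List Fld) :
    (insSort xs).Pairwise (fun a b => fOff a ≤ fOff b) :=
  (insSort_sortedInv xs).imp (fun h => fOff_mono (kby_le_of_bLT_false h))

-- run decomposition of B's scan (proof-side recursion mirroring the foldl)
def runsB (g : Fld) (acc : List Fld) : List Fld → List (Int × List Fld)
  | [] => [(fOff g, g :: acc)]
  | f :: s => if fOff f ≠ fOff g then (fOff g, g :: acc) :: runsB f [] s
              else runsB g (acc ++ [f]) s

-- the distinct offsets after o, in order of appearance
def offsList (o : Int) : List Fld → List Int
  | [] => []
  | f :: s => if fOff f ≠ o then fOff f :: offsList (fOff f) s else offsList o s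

lemma scan_eq_runsB (words : List Int) (s : List Fld) :
    ∀ (lines : List String) (g : Fld) (acc : List Fld),
    pvAltFlush words (s.foldl (pvAltStep words) (lines, g :: acc)) =
      lines ++ (runsB g acc s).map (fun r => mkLine words r.1 r.2) := by
  induction s with
  | nil => intro lines g acc; rfl
  | cons f s ih =>
    intro lines g acc
    rw [List.foldl_cons]
    have h1 : PySem.Int.floordiv f.2.2.1 8 = f.2.2.1 / 8 := PySem.Int.floordiv_eq_ediv_of_pos (by norm_num)
    have h2 : PySem.Int.floordiv g.2.2.1 8 = g.2.2.1 / 8 := PySem.Int.floordiv_eq_ediv_of_pos (by norm_num)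
    by_cases hq : f.2.2.1 / 8 = g.2.2.1 / 8
    · have hstep : pvAltStep words (lines, g :: acc) f = (lines, g :: (acc ++ [f])) := by
        simp [pvAltStep, h1, h2, hq]
      rw [hstep, ih lines g (acc ++ [f])]
      simp [runsB, fOff, h1, h2, hq]
    · have hstep : pvAltStep words (lines, g :: acc) f =
          (lines ++ [mkLine words (PySem.Int.floordiv g.2.2.1 8 * 8) (g :: acc)], [f]) := by
        simp [pvAltStep, h1, h2, hq, mul_eq_mul_right_iff]
      rw [hstep, ih _ f []]
      simp [runsB, fOff, h1, h2, hq, mul_eq_mul_right_iff]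

lemma offsList_gt {s : List Fld} {o : Int}
    (hpw : s.Pairwise (fun a b => fOff a ≤ fOff b)) (hge : ∀ f ∈ s, o ≤ fOff f) :
    ∀ o' ∈ offsList o s, o < o' := by
  induction s generalizing o with
  | nil => simp [offsList]
  | cons f s ih =>
    rcases List.pairwise_cons.mp hpw with ⟨hf, hpw'⟩
    by_cases hne : fOff f ≠ o
    · have hof : o < fOff f := lt_of_le_of_ne (hge f List.mem_cons_self) (Ne.symm hne)
      intro o' ho'
      rw [offsList, if_pos hne] at ho'
      rcases List.mem_cons.mp ho' with rfl | ho''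
      · exact hof
      · exact lt_trans hof (ih hpw' (fun x hx => hf x hx) o' ho'')
    · rw [offsList, if_neg hne]
      have ho : fOff f = o := not_not.mp (by simpa using hne)
      exact ih hpw' (fun x hx => ho ▸ hf x hx)

lemma offsList_mem {s : List Fld} {o : Int}
    (hpw : s.Pairwise (fun a b => fOff a ≤ fOff b)) (hge : ∀ f ∈ s, o ≤ fOff f) :
    ∀ x, x ∈ offsList o s ↔ (x ∈ s.map fOff ∧ x ≠ o) := by
  induction s generalizing o with
  | nil => simp [offsList]
  | cons f s ih =>
    rcases List.pairwise_cons.mp hpw with ⟨hf, hpw'⟩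
    intro x
    by_cases hne : fOff f ≠ o
    · have hof : o < fOff f := lt_of_le_of_ne (hge f List.mem_cons_self) (Ne.symm hne)
      rw [offsList, if_pos hne]
      have hih := ih hpw' (fun g hg => hf g hg)
      constructor
      · intro hx
        rcases List.mem_cons.mp hx with rfl | hx'
        · exact ⟨List.mem_cons_self, by omega⟩
        · rcases (hih x).mp hx' with ⟨hmem, hnef⟩
          have hfx : fOff f ≤ x := by
            rcases List.mem_map.mp hmem with ⟨g, hg, rfl⟩
            exact hf g hg
          exact ⟨List.mem_cons_of_mem _ hmem, by omega⟩
      · rintro ⟨hmem, hxo⟩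
        rcases List.mem_cons.mp hmem with h | h
        · exact List.mem_cons.mpr (Or.inl h)
        · by_cases hxf : x = fOff f
          · exact List.mem_cons.mpr (Or.inl hxf)
          · exact List.mem_cons.mpr (Or.inr ((hih x).mpr ⟨h, hxf⟩))
    · have ho : fOff f = o := not_not.mp (by simpa using hne)
      rw [offsList, if_neg hne]
      rw [ih hpw' (fun g hg => ho ▸ hf g hg) x]
      constructor
      · rintro ⟨hmem, hxo⟩; exact ⟨List.mem_cons_of_mem _ hmem, hxo⟩
      · rintro ⟨hmem, hxo⟩
        rcases List.mem_cons.mp hmem with h | h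
        · exact absurd (h.trans ho) hxo
        · exact ⟨h, hxo⟩

lemma offsList_pairwise {s : List Fld} {o : Int}
    (hpw : s.Pairwise (fun a b => fOff a ≤ fOff b)) (hge : ∀ f ∈ s, o ≤ fOff f) :
    (offsList o s).Pairwise (· < ·) := by
  induction s generalizing o with
  | nil => simp [offsList]
  | cons f s ih =>
    rcases List.pairwise_cons.mp hpw with ⟨hf, hpw'⟩
    by_cases hne : fOff f ≠ o
    · rw [offsList, if_pos hne]
      exact List.pairwise_cons.mpr ⟨offsList_gt hpw' (fun g hg => hf g hg), ih hpw' (fun g hg => hf g hg)⟩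
    · rw [offsList, if_neg hne]
      have ho : fOff f = o := not_not.mp (by simpa using hne)
      exact ih hpw' (fun g hg => ho ▸ hf g hg)

lemma runsB_eq {s : List Fld} {g : Fld} {acc : List Fld}
    (hpw : s.Pairwise (fun a b => fOff a ≤ fOff b)) (hge : ∀ f ∈ s, fOff g ≤ fOff f) :
    runsB g acc s =
      (fOff g, (g :: acc) ++ s.filter (fun f => fOff f == fOff g)) ::
        (offsList (fOff g) s).map (fun o => (o, s.filter (fun f => fOff f == o))) := by
  induction s generalizing g acc with
  | nil => simp [runsB, offsList]
  | cons f s ih =>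
    rcases List.pairwise_cons.mp hpw with ⟨hf, hpw'⟩
    by_cases hne : fOff f ≠ fOff g
    · have hof : fOff g < fOff f := lt_of_le_of_ne (hge f List.mem_cons_self) (Ne.symm hne)
      rw [runsB, if_pos hne, offsList, if_pos hne]
      rw [ih (g := f) (acc := []) hpw' (fun x hx => hf x hx)]
      have hfe : (f :: s).filter (fun x => fOff x == fOff g) = [] := by
        apply List.filter_eq_nil_iff.mpr
        intro x hx
        rcases List.mem_cons.mp hx with rfl | hx
        · simp [hne]
        · have := hf x hx; simp; omega
      rw [hfe]
      simp only [List.map_cons, List.cons.injEq]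
      refine ⟨by simp, ?_, ?_⟩
      · simp [List.filter_cons]
      · apply List.map_congr_left
        intro o ho
        have hgt : fOff f < o := offsList_gt hpw' (fun x hx => hf x hx) o ho
        simp [List.filter_cons, show ¬ (fOff f == o) = true from by simp; omega]
    · have hfo : fOff f = fOff g := not_not.mp (by simpa using hne)
      rw [runsB, if_neg hne, offsList, if_neg hne]
      rw [ih (g := g) (acc := acc ++ [f]) hpw' (fun x hx => hfo ▸ hf x hx)]
      simp only [List.cons.injEq]
      refine ⟨by simp [List.filter_cons, hfo], ?_⟩
      apply List.map_congr_left
      intro o ho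
      have hgt : fOff g < o := offsList_gt hpw' (fun x hx => hfo ▸ hf x hx) o ho
      simp [List.filter_cons, show ¬ (fOff f == o) = true from by simp [hfo]; omega]

-- A's dict: lookups are filters, keys are the distinct offsets in insertion order
lemma grouped_getD (fields : List Fld) (o : Int) :
    (fields.foldl (fun d f => d.modify (PySem.Int.floordiv f.2.2.1 8 * 8) [] (fun l => l ++ [f]))
        PySem.Dict.empty).getD o [] = fields.filter (fun f => fOff f == o) := by
  have h := PySem.Dict.getD_foldl_modify_append (fields.map (fun f => (fOff f, f)))
      PySem.Dict.empty o
  rw [List.foldl_map] at h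
  simpa [fOff, List.filter_map, List.map_map, Function.comp_def] using h

lemma grouped_keys (fields : List Fld) :
    (fields.foldl (fun d f => d.modify (PySem.Int.floordiv f.2.2.1 8 * 8) [] (fun l => l ++ [f]))
        PySem.Dict.empty).keys = PySem.Set.ofList (fields.map (fun f => fOff f)) := by
  have h := PySem.Dict.keys_foldl_modify_key fields (fun f => fOff f) []
      (fun _ f => (fun l => l ++ [f])) PySem.Dict.empty
  simpa [fOff, PySem.Dict.keys_empty, PySem.Set.update, PySem.Set.ofList, PySem.Set.empty] using h

lemma filter_cons_of_ne {o : Int} (f0 : Fld) (s' : List Fld) (h : fOff f0 ≠ o) :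
    (f0 :: s').filter (fun x => fOff x == o) = s'.filter (fun x => fOff x == o) := by
  simp [List.filter_cons, h]

lemma main_eq (words : List Int) (fields : List (String × Int × Int × Int × Int)) :
    format_sbs_compact words fields = format_sbs_compact_alt words fields := by
  cases hS : PySem.List.sorted2 fields (fun f => f.2.2.1) (fun f => f.2.2.2.1) false with
  | nil =>
    have hf : fields = [] := by
      have hp := PySem.List.sorted2_perm fields (fun f => f.2.2.1) (fun f => f.2.2.2.1) false
      rw [hS] at hp
      exact (List.Perm.nil_eq hp).symm
    subst hf
    rfl
  | cons f0 s' =>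
    have hperm : (f0 :: s').Perm fields := by
      rw [← hS]
      exact PySem.List.sorted2_perm fields (fun f => f.2.2.1) (fun f => f.2.2.2.1) false
    have hpwS : (f0 :: s').Pairwise (fun a b => fOff a ≤ fOff b) := by
      rw [← hS, sorted2_eq_insSort]
      exact insSort_fOff_pairwise fields
    rcases List.pairwise_cons.mp hpwS with ⟨hge, hpw'⟩
    have hpwlt : (fOff f0 :: offsList (fOff f0) s').Pairwise (· < ·) :=
      List.pairwise_cons.mpr ⟨offsList_gt hpw' hge, offsList_pairwise hpw' hge⟩
    have hkeys : PySem.List.sorted (PySem.Set.ofList (fields.map (fun f => fOff f))) (fun x => x) false =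
        fOff f0 :: offsList (fOff f0) s' := by
      apply PySem.List.sorted_eq_of_perm_of_pairwise_lt
      · refine (List.perm_ext_iff_of_nodup (hpwlt.imp ne_of_lt) (PySem.Set.nodup_ofList _)).mpr ?_
        intro x
        rw [PySem.Set.mem_ofList]
        have hmp : x ∈ fields.map (fun f => fOff f) ↔ x ∈ (f0 :: s').map (fun f => fOff f) :=
          ((hperm.map (fun f => fOff f)).mem_iff).symm
        rw [hmp]
        simp only [List.mem_cons, List.map_cons]
        rw [offsList_mem hpw' hge x]
        constructor
        · rintro (rfl | ⟨h, _⟩)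
          · exact Or.inl rfl
          · exact Or.inr h
        · rintro (rfl | h)
          · exact Or.inl rfl
          · by_cases hx : x = fOff f0
            · exact Or.inl hx
            · exact Or.inr ⟨h, hx⟩
      · exact hpwlt
    have hB : format_sbs_compact_alt words fields =
        (fOff f0 :: offsList (fOff f0) s').map
          (fun o => mkLine words o ((f0 :: s').filter (fun x => fOff x == o))) := by
      simp only [format_sbs_compact_alt]
      rw [hS, List.foldl_cons, show pvAltStep words ([], []) f0 = ([], [f0]) from rfl,
        scan_eq_runsB words s' [] f0 [], runsB_eq hpw' hge]
      simp only [List.map_cons, List.map_map, List.nil_append, Function.comp_def]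
      congr 1
      · simp
      · apply List.map_congr_left
        intro o ho
        have hgt := offsList_gt hpw' hge o ho
        rw [filter_cons_of_ne f0 s' (by omega)]
    have hA : format_sbs_compact words fields =
        (fOff f0 :: offsList (fOff f0) s').map
          (fun o => mkLine words o (PySem.List.sorted2 (fields.filter (fun f => fOff f == o))
            (fun x => x.2.2.1) (fun x => x.2.2.2.1) false)) := by
      simp only [format_sbs_compact]
      rw [PySem.List.foldl_append_singleton_eq_map, grouped_keys, hkeys]
      simp only [List.nil_append]
      apply List.map_congr_left
      intro o ho
      rw [grouped_getD]
    rw [hA, hB]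
    apply List.map_congr_left
    intro o ho
    have hfilt : (f0 :: s').filter (fun x => fOff x == o) =
        PySem.List.sorted2 (fields.filter (fun x => fOff x == o))
          (fun x => x.2.2.1) (fun x => x.2.2.2.1) false := by
      rw [← hS, sorted2_eq_insSort, sorted2_eq_insSort]
      exact filter_insSort _ fields
    rw [hfilt]

-- ===== VERDICT (by name: the statement is the Claim_ definition above) =====
theorem format_sbs_compact_spec : Claim_equal_format_sbs_compact := by
  intro words fields _
  unfold Spec_format_sbs_compact
  exact main_eq words fields
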